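-- pv_equiv track=rewrite | github.com/Trish-K/PythonProblems | labs109.py | count_troikas
-- ===== SOURCE A (Python) =====
-- def count_troikas(items):
--     from itertools import combinations
--     pos_dict = {}
--     for count,i in enumerate(items):
--         if i not in pos_dict:
--             pos_dict[i] = [count]
--         else:
--             pos_dict[i] += [count]
--     count = 0
--     for key in pos_dict.keys():
--         combs = list(combinations(pos_dict[key],2))
--         for i in combs:
--             k = i[1] + (i[1]-i[0])
--             if k >= len(items):
--                 continue
--             if items[i[0]] == items[k]:
--                 count += 1
--     return count
-- ===== SOURCE B (Python) =====
-- def count_troikas(items):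
--     n = len(items)
--     count = 0
--     for b in range(n):
--         for a in range(b):
--             c = 2 * b - a
--             if c < n and items[a] == items[b] == items[c]:
--                 count += 1
--     return count
-- ===== Notes on version B (the rewrite author's own statement) =====
-- stated objective: simpler
-- what changed: Replaces the value-grouped position dictionary and itertools.combinations pair enumeration with a direct double loop over index pairs (a<b) that checks the equal-value and spacing condition inline.
import Mathlib
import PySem

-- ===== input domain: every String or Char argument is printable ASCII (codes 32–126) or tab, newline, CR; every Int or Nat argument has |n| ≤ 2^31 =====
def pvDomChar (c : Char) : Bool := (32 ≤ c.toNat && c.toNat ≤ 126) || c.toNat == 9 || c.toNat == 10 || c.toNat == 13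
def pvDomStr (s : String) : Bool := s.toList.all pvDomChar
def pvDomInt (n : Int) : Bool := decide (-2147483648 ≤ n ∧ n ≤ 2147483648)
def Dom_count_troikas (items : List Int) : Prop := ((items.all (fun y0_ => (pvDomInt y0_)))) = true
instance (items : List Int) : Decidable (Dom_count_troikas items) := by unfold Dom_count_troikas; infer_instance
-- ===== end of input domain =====

-- B replaces A's value-grouped position dictionary and combinations-based pair enumeration by a
-- direct double loop over index pairs (a < b) with an inline equality/spacing test (objective: simpler).

-- ===== PORT A =====
-- pos_dict is built by a fold over enumerate(items); items[...] is ported with pyGetD, exact here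
-- because every index A reads (a stored position; k after the k < len(items) guard, and k > 0) is in range.
def count_troikas (items : List Int) : Int :=
  let pos : PySem.Dict Int (List Int) :=
    (PySem.List.enumerate items 0).foldl
      (fun d p =>
        if d.contains p.2 = false then d.insert p.2 [p.1]
        else d.insert p.2 (d.getD p.2 [] ++ [p.1]))
      PySem.Dict.empty
  pos.keys.foldl (fun count key =>
    (PySem.List.combinations (pos.getD key []) 2).foldl (fun count i =>
      let k := PySem.List.pyGetD i 1 0 + (PySem.List.pyGetD i 1 0 - PySem.List.pyGetD i 0 0)
      if (items.length : Int) ≤ k then count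
      else if PySem.List.pyGetD items (PySem.List.pyGetD i 0 0) 0 == PySem.List.pyGetD items k 0 then
        count + 1
      else count) count) 0

-- ===== PORT B =====
def count_troikas_alt (items : List Int) : Int :=
  let n := items.length
  (PySem.List.pyRange 0 n 1).foldl (fun count b =>
    (PySem.List.pyRange 0 b 1).foldl (fun count a =>
      let c := 2 * b - a
      if c < (n : Int) ∧ PySem.List.pyGetD items a 0 = PySem.List.pyGetD items b 0
          ∧ PySem.List.pyGetD items b 0 = PySem.List.pyGetD items c 0 then
        count + 1
      else count) count) 0

-- ===== PRECONDITION & SPEC =====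
def Spec_count_troikas (items : List Int) (out : Int) : Prop := out = count_troikas_alt items
instance (items : List Int) (out : Int) : Decidable (Spec_count_troikas items out) := by unfold Spec_count_troikas; infer_instance

-- ===== CLAIM (what is proved, stated in full; the proofs are below) =====
def Claim_equal_count_troikas : Prop := ∀ (items : List Int), Dom_count_troikas items → Spec_count_troikas items (count_troikas items)

-- ===== LEMMAS AND PROOFS =====

-- the condition A tests on a position pair (a, b), stated at the Nat level
def pvQ (items : List Int) (a b : Nat) : Bool :=
  decide (2 * b - a < items.length) && (items.getD a 0 == items.getD (2 * b - a) 0)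

-- number of (ordered) pairs drawn from xs that satisfy Q
def pvCP (Q : Nat → Nat → Bool) (xs : List Nat) : Nat :=
  (PySem.List.combinations xs 2).countP (fun l => Q (l.getD 0 0) (l.getD 1 0))

-- positions of value v among the first m indices of items
def pvYs (items : List Int) (m : Nat) (v : Int) : List Nat :=
  (List.range m).filter (fun a => items.getD a 0 == v)

-- A's count, per distinct value; B's count, per right index b
def pvTotA (items : List Int) (m : Nat) : Nat :=
  ((PySem.List.dedup items).map (fun v => pvCP (pvQ items) (pvYs items m v))).sum
def pvTotB (items : List Int) (m : Nat) : Nat :=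
  ((List.range m).map (fun b =>
    (List.range b).countP (fun a => (items.getD a 0 == items.getD b 0) && pvQ items a b))).sum

theorem pvCP_cons (Q : Nat → Nat → Bool) (x : Nat) (xs : List Nat) :
    pvCP Q (x :: xs) = xs.countP (fun y => Q x y) + pvCP Q xs := by
  unfold pvCP
  rw [PySem.List.combinations_cons_succ, PySem.List.combinations_one]
  simp [List.countP_append, List.countP_map, Function.comp_def]

theorem pvCP_append (Q : Nat → Nat → Bool) (xs : List Nat) (y : Nat) :
    pvCP Q (xs ++ [y]) = pvCP Q xs + xs.countP (fun a => Q a y) := by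
  induction xs with
  | nil => simp [pvCP, PySem.List.combinations_cons_succ, PySem.List.combinations_one,
      PySem.List.combinations_nil_succ]
  | cons h t ih =>
    rw [List.cons_append, pvCP_cons, pvCP_cons, ih, List.countP_append]
    simp [List.countP_cons]
    omega

theorem pv_sum_map_add (V : List Int) (f g : Int → Nat) :
    (V.map (fun v => f v + g v)).sum = (V.map f).sum + (V.map g).sum := by
  induction V with
  | nil => simp
  | cons h t ih => simp [ih]; omega

theorem pv_sum_pick (V : List Int) (t : Int) (g : Int → Nat)
    (hnd : V.Nodup) (ht : t ∈ V) :
    (V.map (fun v => if v = t then g v else 0)).sum = g t := by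
  induction V with
  | nil => simp at ht
  | cons h tl ih =>
    rcases List.mem_cons.1 ht with he | hm
    · subst he
      have hz : ∀ x ∈ tl.map (fun v => if v = t then g v else 0), x = 0 := by
        intro x hx
        rcases List.mem_map.1 hx with ⟨v, hv, rfl⟩
        have : v ≠ t := fun e => (List.nodup_cons.1 hnd).1 (e ▸ hv)
        simp [this]
      simp [List.sum_eq_zero hz]
    · have hne : h ≠ t := fun e => (List.nodup_cons.1 hnd).1 (e ▸ hm)
      simp [hne, ih (List.nodup_cons.1 hnd).2 hm]

theorem pv_tot_eq (items : List Int) : ∀ m, m ≤ items.length →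
    pvTotA items m = pvTotB items m := by
  intro m
  induction m with
  | zero => simp [pvTotA, pvTotB, pvYs, pvCP, PySem.List.combinations_nil_succ]
  | succ k ih =>
    intro hk
    have hk' : k ≤ items.length := Nat.le_of_succ_le hk
    have hklt : k < items.length := hk
    have hys : ∀ v, pvYs items (k+1) v
        = pvYs items k v ++ (if items.getD k 0 == v then [k] else []) := by
      intro v
      simp only [pvYs, List.range_succ, List.filter_append, List.filter_cons, List.filter_nil]
    have hstep : ∀ v, pvCP (pvQ items) (pvYs items (k+1) v)
        = pvCP (pvQ items) (pvYs items k v)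
          + (if v = items.getD k 0 then (pvYs items k v).countP (fun a => pvQ items a k) else 0) := by
      intro v
      rw [hys v]
      by_cases h : items.getD k 0 = v
      · subst h
        rw [if_pos (by simp), pvCP_append, if_pos rfl]
      · have h' : v ≠ items.getD k 0 := fun e => h e.symm
        rw [if_neg (by simpa [List.getD] using h), if_neg h', List.append_nil, Nat.add_zero]
    have hmem : items.getD k 0 ∈ PySem.List.dedup items := by
      rw [PySem.List.mem_dedup]
      rw [List.getD_eq_getElem items 0 hklt]
      exact List.getElem_mem hklt
    have hA : pvTotA items (k+1)
        = pvTotA items k + (pvYs items k (items.getD k 0)).countP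
            (fun a => pvQ items a k) := by
      unfold pvTotA
      calc ((PySem.List.dedup items).map (fun v => pvCP (pvQ items) (pvYs items (k+1) v))).sum
          = ((PySem.List.dedup items).map (fun v =>
              pvCP (pvQ items) (pvYs items k v)
              + (if v = items.getD k 0 then (pvYs items k v).countP (fun a => pvQ items a k) else 0))).sum := by
            exact congrArg List.sum (List.map_congr_left (fun v _ => hstep v))
        _ = _ := by
            rw [pv_sum_map_add,
              pv_sum_pick _ _ _ (PySem.List.nodup_dedup items) hmem]
    have hcnt : (pvYs items k (items.getD k 0)).countP (fun a => pvQ items a k)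
        = (List.range k).countP (fun a => (items.getD a 0 == items.getD k 0) && pvQ items a k) := by
      unfold pvYs
      rw [List.countP_filter]
      exact List.countP_congr (fun a _ => by rw [Bool.and_comm])
    have hB : pvTotB items (k+1)
        = pvTotB items k + (List.range k).countP
            (fun a => (items.getD a 0 == items.getD k 0) && pvQ items a k) := by
      unfold pvTotB
      rw [List.range_succ, List.map_append, List.sum_append]
      simp
    rw [hA, hB, ih hk', hcnt]

def pvPos (items : List Int) : PySem.Dict Int (List Int) :=
  (PySem.List.enumerate items 0).foldl
    (fun d p => d.modify p.2 [] (· ++ [p.1])) PySem.Dict.empty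

theorem pvPos_fold_eq (items : List Int) :
    (PySem.List.enumerate items 0).foldl
      (fun d p =>
        if d.contains p.2 = false then d.insert p.2 [p.1]
        else d.insert p.2 (d.getD p.2 [] ++ [p.1]))
      PySem.Dict.empty = pvPos items := by
  unfold pvPos
  congr 1
  funext d p
  by_cases h : d.contains p.2 = false
  · rw [if_pos h]
    show d.insert p.2 [p.1] = d.insert p.2 (d.getD p.2 [] ++ [p.1])
    rw [PySem.Dict.getD_of_not_contains (h := h), List.nil_append]
  · rw [if_neg h]; rfl

theorem pvPos_keys (items : List Int) :
    (pvPos items).keys = PySem.Set.ofList items := by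
  unfold pvPos
  rw [PySem.Dict.keys_foldl_modify_key]
  rw [PySem.List.map_snd_enumerate]
  rfl

theorem pvPos_getD (items : List Int) (v : Int) :
    (pvPos items).getD v [] = (pvYs items items.length v).map ((fun a => (a : Int)) : Nat → Int) := by
  unfold pvPos
  rw [show (PySem.List.enumerate items 0)
      = ((PySem.List.enumerate items 0).map Prod.swap).map Prod.swap by
    simp [List.map_map, Function.comp_def]]
  rw [List.foldl_map]
  have := PySem.Dict.getD_foldl_modify_append
    (l := (PySem.List.enumerate items 0).map Prod.swap)
    (d := (PySem.Dict.empty : PySem.Dict Int (List Int))) (c := v)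
  simp only [Prod.fst_swap, Prod.snd_swap] at this ⊢
  rw [this]
  rw [PySem.Dict.getD_empty, List.nil_append]
  rw [PySem.List.enumerate_eq_map_pyRange items 0]
  simp only [PySem.List.len_eq]
  rw [PySem.List.pyRange_zero_natCast]
  simp only [List.map_map, Function.comp_def, Prod.swap_prod_mk, List.filter_map,
    PySem.List.pyGetD_natCast]
  simp [pvYs]

theorem pv_innerA (items : List Int) (ys : List Nat)
    (hpw0 : ys.Pairwise (· < ·)) (hb0 : ∀ x ∈ ys, x < items.length) (count : Int) :
    (PySem.List.combinations (ys.map ((fun a => (a : Int)) : Nat → Int)) 2).foldl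
      (fun count i =>
        let k := PySem.List.pyGetD i 1 0 + (PySem.List.pyGetD i 1 0 - PySem.List.pyGetD i 0 0)
        if (items.length : Int) ≤ k then count
        else if PySem.List.pyGetD items (PySem.List.pyGetD i 0 0) 0 == PySem.List.pyGetD items k 0 then
          count + 1
        else count) count
    = count + (pvCP (pvQ items) ys : Int) := by
  have hbody : (fun (count : Int) (i : List Int) =>
      let k := PySem.List.pyGetD i 1 0 + (PySem.List.pyGetD i 1 0 - PySem.List.pyGetD i 0 0)
      if (items.length : Int) ≤ k then count
      else if PySem.List.pyGetD items (PySem.List.pyGetD i 0 0) 0 == PySem.List.pyGetD items k 0 then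
        count + 1
      else count)
      = fun (count : Int) (i : List Int) =>
        if ¬ (items.length : Int) ≤ PySem.List.pyGetD i 1 0 + (PySem.List.pyGetD i 1 0 - PySem.List.pyGetD i 0 0)
            ∧ PySem.List.pyGetD items (PySem.List.pyGetD i 0 0) 0
              = PySem.List.pyGetD items (PySem.List.pyGetD i 1 0 + (PySem.List.pyGetD i 1 0 - PySem.List.pyGetD i 0 0)) 0 then
          count + 1
        else count := by
    funext count i
    dsimp only
    by_cases h1 : (items.length : Int) ≤ PySem.List.pyGetD i 1 0 + (PySem.List.pyGetD i 1 0 - PySem.List.pyGetD i 0 0)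
    · simp [h1]
    · by_cases h2 : PySem.List.pyGetD items (PySem.List.pyGetD i 0 0) 0
          = PySem.List.pyGetD items (PySem.List.pyGetD i 1 0 + (PySem.List.pyGetD i 1 0 - PySem.List.pyGetD i 0 0)) 0
        <;> simp [h1, h2]
  rw [hbody, PySem.List.foldl_ite_add_one, PySem.List.combinations_map, List.countP_map]
  have hcnt : ∀ l ∈ PySem.List.combinations ys 2,
      ((fun i => decide
          (¬ (items.length : Int) ≤ PySem.List.pyGetD i 1 0 + (PySem.List.pyGetD i 1 0 - PySem.List.pyGetD i 0 0)
            ∧ PySem.List.pyGetD items (PySem.List.pyGetD i 0 0) 0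
              = PySem.List.pyGetD items (PySem.List.pyGetD i 1 0 + (PySem.List.pyGetD i 1 0 - PySem.List.pyGetD i 0 0)) 0))
        ∘ List.map ((fun a => (a : Int)) : Nat → Int)) l
      = pvQ items (l.getD 0 0) (l.getD 1 0) := by
    intro l hl
    obtain ⟨hsub, hlen⟩ := (PySem.List.mem_combinations_iff _ _ _).mp hl
    have hpw : l.Pairwise (· < ·) := List.Pairwise.sublist hsub hpw0
    have hbnd : ∀ x ∈ l, x < items.length := fun x hx => hb0 x (hsub.mem hx)
    obtain ⟨a, b, rfl⟩ : ∃ a b, l = [a, b] := by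
      match l, hlen with
      | [a, b], _ => exact ⟨a, b, rfl⟩
    have hab : a < b := (List.pairwise_cons.mp hpw).1 b (by simp)
    have hbn : b < items.length := hbnd b (by simp)
    have e0 : PySem.List.pyGetD ([(a : Int), (b : Int)]) 0 0 = (a : Int) := by
      simp [PySem.List.pyGetD]
    have e1 : PySem.List.pyGetD ([(a : Int), (b : Int)]) 1 0 = (b : Int) := by
      simp [PySem.List.pyGetD]
    simp only [Function.comp_def, List.map_cons, List.map_nil, e0, e1]
    have hk : (b : Int) + ((b : Int) - (a : Int)) = ((2 * b - a : Nat) : Int) := by omega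
    rw [hk]
    simp only [PySem.List.pyGetD_natCast, List.getD_cons_zero, List.getD_cons_succ]
    by_cases h3 : 2 * b - a < items.length <;> simp [pvQ, h3]
    all_goals
      first
        | omega
        | (by_cases h5 : items[a]?.getD 0 = items[2 * b - a] <;> simp [h5])
  rw [List.countP_congr (fun l hl => by rw [hcnt l hl])]
  rfl

theorem pvA_eq (items : List Int) :
    count_troikas items = (pvTotA items items.length : Int) := by
  unfold count_troikas
  dsimp only
  rw [pvPos_fold_eq]
  have hbody : (fun (count : Int) (key : Int) =>
      (PySem.List.combinations ((pvPos items).getD key []) 2).foldl (fun count i =>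
        let k := PySem.List.pyGetD i 1 0 + (PySem.List.pyGetD i 1 0 - PySem.List.pyGetD i 0 0)
        if (items.length : Int) ≤ k then count
        else if PySem.List.pyGetD items (PySem.List.pyGetD i 0 0) 0 == PySem.List.pyGetD items k 0 then
          count + 1
        else count) count)
      = fun (count : Int) (key : Int) =>
        count + (pvCP (pvQ items) (pvYs items items.length key) : Int) := by
    funext count key
    rw [pvPos_getD]
    exact pv_innerA items (pvYs items items.length key)
      (List.Pairwise.filter _ (List.pairwise_lt_range))
      (fun x hx => List.mem_range.mp (List.mem_of_mem_filter hx)) count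
  rw [hbody, PySem.List.foldl_add, pvPos_keys]
  rw [show PySem.Set.ofList items = PySem.List.dedup items from (PySem.List.dedup_eq_ofList items).symm]
  simp [pvTotA, Nat.cast_list_sum, List.map_map, Function.comp_def]

theorem pv_inner_eq (items : List Int) (bn : Nat) (count : Int) :
    (PySem.List.pyRange 0 (bn : Int) 1).foldl (fun count a =>
      if 2 * (bn : Int) - a < (items.length : Int)
          ∧ PySem.List.pyGetD items a 0 = PySem.List.pyGetD items (bn : Int) 0
          ∧ PySem.List.pyGetD items (bn : Int) 0 = PySem.List.pyGetD items (2 * (bn : Int) - a) 0 then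
        count + 1
      else count) count
    = count + ((List.range bn).countP
        (fun a => (items.getD a 0 == items.getD bn 0) && pvQ items a bn) : Int) := by
  rw [PySem.List.pyRange_zero_natCast, List.foldl_map, PySem.List.foldl_ite_add_one]
  congr 2
  apply List.countP_congr
  intro a ha
  have ha' : a < bn := List.mem_range.mp ha
  have hc : 2 * (bn : Int) - (a : Int) = ((2 * bn - a : Nat) : Int) := by omega
  rw [hc]
  simp only [PySem.List.pyGetD_natCast]
  by_cases h2 : items.getD a 0 = items.getD bn 0 <;>
    by_cases h3 : 2 * bn - a < items.length <;>
      simp [pvQ, h3] <;> omega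

theorem pvB_eq (items : List Int) :
    count_troikas_alt items = (pvTotB items items.length : Int) := by
  unfold count_troikas_alt
  dsimp only
  rw [PySem.List.pyRange_zero_natCast, List.foldl_map]
  have hbody : (fun (count : Int) (bn : Nat) =>
      (PySem.List.pyRange 0 (bn : Int) 1).foldl (fun count a =>
        if 2 * (bn : Int) - a < (items.length : Int)
            ∧ PySem.List.pyGetD items a 0 = PySem.List.pyGetD items (bn : Int) 0
            ∧ PySem.List.pyGetD items (bn : Int) 0 = PySem.List.pyGetD items (2 * (bn : Int) - a) 0 then
          count + 1
        else count) count)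
      = fun (count : Int) (bn : Nat) => count + ((List.range bn).countP
          (fun a => (items.getD a 0 == items.getD bn 0) && pvQ items a bn) : Int) :=
    funext fun c => funext fun bn => pv_inner_eq items bn c
  rw [hbody, PySem.List.foldl_add]
  simp [pvTotB, Nat.cast_list_sum, List.map_map, Function.comp_def]

-- ===== VERDICT (by name: the statement is the Claim_ definition above) =====
theorem count_troikas_spec : Claim_equal_count_troikas := by
  intro items _
  unfold Spec_count_troikas
  rw [pvA_eq, pvB_eq, pv_tot_eq items items.length le_rfl]
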